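-- pv_equiv track=rewrite | github.com/lutianming/leetcode | basic_calculator_2.py | next_int
-- ===== SOURCE A (Python) =====
-- def next_int(s, i):
--     number = ""
--     n = len(s)
--     while i < n:
--         c = s[i]
--         if c.isdigit():
--             number = number + c
--         elif c == ' ':
--             pass
--         else:
--             break
--         i += 1
--     return (int(number), i)
-- ===== SOURCE B (Python) =====
-- def next_int(s, i):
--     tail = s[i:]
--     k = len(tail)
--     for pos, c in enumerate(tail):
--         if not (c.isdigit() or c == ' '):
--             k = pos
--             break
--     return (int(tail[:k].replace(' ', '')), i + k)
-- ===== Notes on version B (the rewrite author's own statement) =====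
-- stated objective: alternative
-- what changed: B takes the suffix slice s[i:] up front, finds the token boundary with an enumerate-for/break over that slice, and converts once via int on the space-stripped prefix, instead of A's index-driven while loop that accumulates a digit string character by character; Pre_ excludes inputs where A raises ValueError (no digit before the stopping character) and negative i whose wrapped scan runs past the end of the string, where negative-index wraparound lets A re-scan the front (an accidental value).
-- outside the precondition, e.g. on next_int('1', -1): A returns (11, 1), B returns (1, 0); on next_int('a1', -1): A returns (1, 0), B returns (1, 0); on next_int('abc', 0): A raises ValueError, B raises ValueError
import Mathlib
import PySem

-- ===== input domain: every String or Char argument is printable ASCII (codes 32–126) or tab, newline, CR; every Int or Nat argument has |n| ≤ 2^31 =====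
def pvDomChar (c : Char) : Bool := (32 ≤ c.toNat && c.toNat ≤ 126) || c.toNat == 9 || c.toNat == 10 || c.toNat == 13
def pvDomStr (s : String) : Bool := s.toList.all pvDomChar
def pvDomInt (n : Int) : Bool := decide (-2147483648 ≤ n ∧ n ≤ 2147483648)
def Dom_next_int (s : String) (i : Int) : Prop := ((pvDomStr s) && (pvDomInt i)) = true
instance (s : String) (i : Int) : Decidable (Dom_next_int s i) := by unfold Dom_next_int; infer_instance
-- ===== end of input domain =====

-- B slices the suffix s[i:] up front, finds the token boundary positionally over that slice,
-- and converts once via int on the space-stripped prefix, instead of A's index-driven while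
-- loop accumulating a digit string character by character.


-- ===== PORT A =====
-- A's while loop: accumulate digits into `number`, skip spaces, break otherwise.
def nextIntLoopA (t : List Char) (n : Int) : Int → List Char → Nat → (List Char × Int)
  | i, number, 0 => (number, i)
  | i, number, fuel + 1 =>
    if i < n then
      match PySem.List.pyGet? t i with
      | some c =>
        if PySem.Chars.isdigit c then nextIntLoopA t n (i + 1) (number ++ [c]) fuel
        else if c == ' ' then nextIntLoopA t n (i + 1) number fuel
        else (number, i)
      | none => (number, i)   -- s[i] raises IndexError; outside Pre_
    else (number, i)

def next_int (s : String) (i : Int) : Int × Int :=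
  let t := s.toList
  let n : Int := t.length
  let r := nextIntLoopA t n i [] (n - i).toNat
  match PySem.Int.ofChars? r.1 with
  | some v => (v, r.2)
  | none => (0, r.2)          -- int("") raises ValueError; outside Pre_

-- ===== PORT B =====
-- B's for/break over enumerate(tail): first position whose char is neither digit nor space,
-- defaulting to len(tail).
def nextIntFindB (dflt : Nat) : List Char → Nat → Nat
  | [], _ => dflt
  | c :: rest, pos =>
    if PySem.Chars.isdigit c || c == ' ' then nextIntFindB dflt rest (pos + 1) else pos

def next_int_alt (s : String) (i : Int) : Int × Int :=
  let tail := PySem.List.slice s.toList (some i) none     -- tail = s[i:]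
  let k := nextIntFindB tail.length tail 0
  -- tail[:k].replace(' ', '') : exact as a filter, since the pattern is one char and the
  -- replacement is empty
  let digits := (tail.take k).filter (fun c => c != ' ')
  match PySem.Int.ofChars? digits with
  | some v => (v, i + (k : Int))
  | none => (0, i + (k : Int))   -- int('') raises ValueError; outside Pre_

-- ===== PRECONDITION & SPEC =====
-- pvPreTok: a digit occurs at or after position p before any stopping character (else int("") raises ValueError).
def pvPreTok (t : List Char) (p : Nat) : Prop :=
  ∃ j < t.length, p ≤ j ∧ PySem.Chars.isdigit (t.getD j ' ') = true ∧
    ∀ k, p ≤ k → k < j → (PySem.Chars.isdigit (t.getD k ' ') || (t.getD k ' ' == ' ')) = true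
-- pvPreStop: a stopping character occurs at or after position p (the scan breaks before the end of the string).
def pvPreStop (t : List Char) (p : Nat) : Prop :=
  ∃ j < t.length, p ≤ j ∧ (PySem.Chars.isdigit (t.getD j ' ') || (t.getD j ' ' == ' ')) = false ∧
    ∀ k, p ≤ k → k < j → (PySem.Chars.isdigit (t.getD k ' ') || (t.getD k ' ' == ' ')) = true
-- Pre_ excludes (a) inputs with no digit before the stopping character, where both programs raise
-- ValueError on int(""), and (b) negative i whose wrapped scan runs past the end of the string, where
-- Python's negative-index wraparound lets A re-scan the front of the string (an accidental value).
-- Negative i whose scan stops inside the string stays inside Pre_.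
def Pre_next_int (s : String) (i : Int) : Prop :=
  if 0 ≤ i then pvPreTok s.toList i.toNat
  else -(s.toList.length : Int) ≤ i ∧ pvPreTok s.toList (i + s.toList.length).toNat
         ∧ pvPreStop s.toList (i + s.toList.length).toNat
instance (s : String) (i : Int) : Decidable (Pre_next_int s i) := by
  unfold Pre_next_int pvPreTok pvPreStop; infer_instance
def pvWitness_next_int : String × Int := (" 12a", 0)

def Spec_next_int (s : String) (i : Int) (out : Int × Int) : Prop := out = next_int_alt s i
instance (s : String) (i : Int) (out : Int × Int) : Decidable (Spec_next_int s i out) := by unfold Spec_next_int; infer_instance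

-- ===== CLAIM (what is proved, stated in full; the proofs are below) =====
def Claim_equal_next_int : Prop := ∀ (s : String) (i : Int), Dom_next_int s i → Pre_next_int s i → Spec_next_int s i (next_int s i)

-- ===== LEMMAS AND PROOFS =====

-- The scan predicate both programs stop on.
def pvScanPred (c : Char) : Bool := PySem.Chars.isdigit c || c == ' '

lemma loopA_eq (t : List Char) : ∀ (fuel k : Nat) (number : List Char), fuel = ((t.length : Int) - k).toNat →
    nextIntLoopA t t.length (k : Int) number fuel
      = (number ++ ((t.drop k).takeWhile pvScanPred).filter (fun c => PySem.Chars.isdigit c),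
         ((k + ((t.drop k).takeWhile pvScanPred).length : Nat) : Int)) := by
  intro fuel
  induction fuel with
  | zero =>
    intro k number hf
    have hk : t.length ≤ k := by omega
    simp [nextIntLoopA, List.drop_eq_nil_of_le hk]
  | succ fuel ih =>
    intro k number hf
    have hk : k < t.length := by omega
    have hlt : (k : Int) < (t.length : Int) := by exact_mod_cast hk
    have hget : t[k]? = some t[k] := List.getElem?_eq_getElem hk
    have hdrop : t.drop k = t[k] :: t.drop (k + 1) := List.drop_eq_getElem_cons hk
    have hcast : ((k : Int) + 1) = ((k + 1 : Nat) : Int) := by push_cast; ring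
    rw [hdrop, List.takeWhile_cons]
    by_cases hd : PySem.Chars.isdigit t[k]
    · have hp : pvScanPred t[k] = true := by simp [pvScanPred, hd]
      rw [if_pos hp]
      have hrec : nextIntLoopA t t.length (k : Int) number (fuel + 1)
          = nextIntLoopA t t.length ((k : Int) + 1) (number ++ [t[k]]) fuel := by
        simp [nextIntLoopA, hlt, hget, hd]
      rw [hrec, hcast, ih (k + 1) _ (by omega)]
      rw [List.filter_cons_of_pos hd]
      simp only [Prod.mk.injEq, List.append_assoc, List.singleton_append, List.length_cons, true_and]
      push_cast; omega
    · by_cases hs : t[k] == ' '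
      · have hp : pvScanPred t[k] = true := by simp [pvScanPred, hs]
        rw [if_pos hp]
        have hrec : nextIntLoopA t t.length (k : Int) number (fuel + 1)
            = nextIntLoopA t t.length ((k : Int) + 1) number fuel := by
          have hds : PySem.Chars.isdigit ' ' = false := by decide
          simp only [Bool.not_eq_true] at hd
          simp [nextIntLoopA, hlt, hget, eq_of_beq hs, hds]
        rw [hrec, hcast, ih (k + 1) _ (by omega)]
        rw [List.filter_cons_of_neg (by simp [hd])]
        simp only [Prod.mk.injEq, List.length_cons, true_and]
        push_cast; omega
      · have hp : pvScanPred t[k] = false := by simp [pvScanPred, hd, hs]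
        rw [if_neg (by simp [hp])]
        have hs' : ¬ t[k] = ' ' := by simpa using hs
        simp [nextIntLoopA, hlt, hget, hd, hs']

lemma loopA_eq_neg (t : List Char) : ∀ (fuel p : Nat) (number : List Char),
    p + ((t.drop p).takeWhile pvScanPred).length < t.length →
    ((t.drop p).takeWhile pvScanPred).length < fuel →
    nextIntLoopA t t.length ((p : Int) - t.length) number fuel
      = (number ++ ((t.drop p).takeWhile pvScanPred).filter (fun c => PySem.Chars.isdigit c),
         (((p + ((t.drop p).takeWhile pvScanPred).length : Nat) : Int) - t.length)) := by
  intro fuel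
  induction fuel with
  | zero => intro p number h hf; omega
  | succ fuel ih =>
    intro p number h hf
    have hp : p < t.length := by omega
    have hlt : (p : Int) - t.length < (t.length : Int) := by omega
    have hidx : ((p : Int) - t.length) = -(((t.length - p : Nat) : Int)) := by
      rw [Int.natCast_sub hp.le]; ring
    have hget : PySem.List.pyGet? t ((p : Int) - t.length) = t[p]? := by
      rw [hidx, PySem.List.pyGet?_neg_natCast t (t.length - p) (by omega) (by omega)]
      congr 1; omega
    have hget' : t[p]? = some t[p] := List.getElem?_eq_getElem hp
    have hdrop : t.drop p = t[p] :: t.drop (p + 1) := List.drop_eq_getElem_cons hp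
    have hcast : ((p : Int) - t.length + 1) = (((p + 1 : Nat) : Int) - t.length) := by push_cast; ring
    by_cases hd : PySem.Chars.isdigit t[p]
    · have hsp : pvScanPred t[p] = true := by simp [pvScanPred, hd]
      have hL : ((t.drop p).takeWhile pvScanPred).length
          = ((t.drop (p + 1)).takeWhile pvScanPred).length + 1 := by
        rw [hdrop, List.takeWhile_cons, if_pos hsp]; simp
      have hF : ((t.drop p).takeWhile pvScanPred).filter (fun c => PySem.Chars.isdigit c)
          = t[p] :: ((t.drop (p + 1)).takeWhile pvScanPred).filter (fun c => PySem.Chars.isdigit c) := by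
        rw [hdrop, List.takeWhile_cons, if_pos hsp, List.filter_cons_of_pos hd]
      have hrec : nextIntLoopA t t.length ((p : Int) - t.length) number (fuel + 1)
          = nextIntLoopA t t.length ((p : Int) - t.length + 1) (number ++ [t[p]]) fuel := by
        simp [nextIntLoopA, hlt, hget, hget', hd]
      rw [hrec, hcast, ih (p + 1) _ (by omega) (by omega), hL, hF]
      simp only [Prod.mk.injEq, List.append_assoc, List.singleton_append, true_and]
      push_cast; ring
    · by_cases hs : t[p] == ' '
      · have hsp : pvScanPred t[p] = true := by simp [pvScanPred, hs]
        have hL : ((t.drop p).takeWhile pvScanPred).length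
            = ((t.drop (p + 1)).takeWhile pvScanPred).length + 1 := by
          rw [hdrop, List.takeWhile_cons, if_pos hsp]; simp
        have hF : ((t.drop p).takeWhile pvScanPred).filter (fun c => PySem.Chars.isdigit c)
            = ((t.drop (p + 1)).takeWhile pvScanPred).filter (fun c => PySem.Chars.isdigit c) := by
          rw [hdrop, List.takeWhile_cons, if_pos hsp, List.filter_cons_of_neg (by simp [hd])]
        have hds : PySem.Chars.isdigit ' ' = false := by decide
        have hrec : nextIntLoopA t t.length ((p : Int) - t.length) number (fuel + 1)
            = nextIntLoopA t t.length ((p : Int) - t.length + 1) number fuel := by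
          simp [nextIntLoopA, hlt, hget, hget', eq_of_beq hs, hds]
        rw [hrec, hcast, ih (p + 1) _ (by omega) (by omega), hL, hF]
        simp only [Prod.mk.injEq, true_and]
        push_cast; ring
      · have hsp : pvScanPred t[p] = false := by simp [pvScanPred, hd, hs]
        have hL : ((t.drop p).takeWhile pvScanPred).length = 0 := by
          rw [hdrop, List.takeWhile_cons, if_neg (by simp [hsp])]; rfl
        have hNil : (t.drop p).takeWhile pvScanPred = [] := List.eq_nil_of_length_eq_zero hL
        have hs' : ¬ t[p] = ' ' := by simpa using hs
        have hret : nextIntLoopA t t.length ((p : Int) - t.length) number (fuel + 1)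
            = (number, (p : Int) - t.length) := by
          simp [nextIntLoopA, hlt, hget, hget', hd, hs']
        rw [hret, hNil]
        simp

-- B's positional find returns the takeWhile length (the default fires exactly when the
-- whole list satisfies the predicate).
lemma findB_eq : ∀ (l : List Char) (pos : Nat),
    nextIntFindB (pos + l.length) l pos = pos + (l.takeWhile pvScanPred).length := by
  intro l
  induction l with
  | nil => intro pos; simp [nextIntFindB]
  | cons c rest ih =>
    intro pos
    by_cases hp : pvScanPred c
    · have hp' : (PySem.Chars.isdigit c || c == ' ') = true := hp
      calc nextIntFindB (pos + (c :: rest).length) (c :: rest) pos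
          = nextIntFindB ((pos + 1) + rest.length) rest (pos + 1) := by
            simp only [nextIntFindB, hp', if_true, List.length_cons]
            congr 1; omega
        _ = (pos + 1) + (rest.takeWhile pvScanPred).length := ih (pos + 1)
        _ = pos + ((c :: rest).takeWhile pvScanPred).length := by
            rw [List.takeWhile_cons, if_pos hp]; simp; omega
    · have hp' : (PySem.Chars.isdigit c || c == ' ') = false := by simpa [pvScanPred] using hp
      simp [nextIntFindB, hp', hp]

lemma take_takeWhile_length {α : Type} (l : List α) (p : α → Bool) :
    l.take (l.takeWhile p).length = l.takeWhile p := by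
  have h := List.takeWhile_prefix (l := l) p
  exact (List.prefix_iff_eq_take.mp h).symm

-- On the scanned region every char is a digit or a space, so dropping spaces keeps exactly the digits.
lemma filter_ne_space_eq (l : List Char) :
    (l.takeWhile pvScanPred).filter (fun c => c != ' ')
      = (l.takeWhile pvScanPred).filter (fun c => PySem.Chars.isdigit c) := by
  apply List.filter_congr
  intro c hc
  have hp : pvScanPred c = true := List.mem_takeWhile_imp hc
  by_cases hs : c = ' '
  · subst hs; decide
  · have hd : PySem.Chars.isdigit c = true := by
      rcases Bool.or_eq_true_iff.mp hp with h | h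
      · exact h
      · exact absurd (eq_of_beq h) hs
    simp [hs, hd]

lemma takeWhile_length_le_of_not {α : Type} (l : List α) (p : α → Bool) (j : Nat)
    (hj : j < l.length) (h : p l[j] = false) : (l.takeWhile p).length ≤ j := by
  by_contra hc
  push Not at hc
  have hpre := List.takeWhile_prefix (l := l) p
  have hg : (l.takeWhile p)[j] = l[j] := List.IsPrefix.getElem hpre (by omega)
  have h2 : p l[j] = true := by
    rw [← hg]
    exact List.mem_takeWhile_imp (List.getElem_mem _)
  simp [h2] at h

-- From pvPreStop: the scan's takeWhile stops strictly before the end of the string.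
lemma stop_bound (t : List Char) (p : Nat) (h : pvPreStop t p) :
    p + ((t.drop p).takeWhile pvScanPred).length < t.length := by
  obtain ⟨j, hj, hpj, hstop, hall⟩ := h
  have hget : t.getD j ' ' = t[j] := List.getD_eq_getElem t ' ' hj
  have hstop' : pvScanPred t[j] = false := by rw [← hget]; exact hstop
  have hlen : j - p < (t.drop p).length := by simp [List.length_drop]; omega
  have hgd : (t.drop p)[j - p] = t[j] := by
    rw [List.getElem_drop]
    congr 1; omega
  have := takeWhile_length_le_of_not (t.drop p) pvScanPred (j - p) hlen (by rw [hgd]; exact hstop')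
  omega

-- ===== VERDICT (by name: the statement is the Claim_ definition above) =====
theorem next_int_spec : Claim_equal_next_int := by
  intro s i _ hPre
  unfold Spec_next_int
  unfold Pre_next_int at hPre
  set t := s.toList with ht
  by_cases hi : 0 ≤ i
  · rw [if_pos hi] at hPre
    obtain ⟨k, rfl⟩ : ∃ k : Nat, i = (k : Int) := ⟨i.toNat, (Int.toNat_of_nonneg hi).symm⟩
    show next_int s (k : Int) = next_int_alt s (k : Int)
    simp only [next_int, next_int_alt, ← ht]
    rw [loopA_eq t _ k [] rfl, PySem.List.slice_from_natCast]
    have hfind : nextIntFindB (t.drop k).length (t.drop k) 0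
        = ((t.drop k).takeWhile pvScanPred).length := by
      have := findB_eq (t.drop k) 0
      simpa using this
    rw [hfind, take_takeWhile_length, filter_ne_space_eq]
    simp only [List.nil_append]
    have : ((k + ((t.drop k).takeWhile pvScanPred).length : Nat) : Int)
        = (k : Int) + (((t.drop k).takeWhile pvScanPred).length : Int) := by push_cast; ring
    rw [this]
  · rw [if_neg hi] at hPre
    obtain ⟨hlo, -, hstop⟩ := hPre
    push Not at hi
    set p : Nat := (i + t.length).toNat with hp
    have hip : i = (p : Int) - t.length := by omega
    have hbound : p + ((t.drop p).takeWhile pvScanPred).length < t.length := stop_bound t p hstop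
    have hfuel : ((t.drop p).takeWhile pvScanPred).length
        < ((t.length : Int) - ((p : Int) - t.length)).toNat := by omega
    have hslice : PySem.List.slice t (some ((p : Int) - t.length)) none = t.drop p := by
      have hk : ((p : Int) - t.length) = -(((t.length - p : Nat) : Int)) := by
        rw [Int.natCast_sub (by omega)]; ring
      rw [hk, PySem.List.slice_from_neg_natCast t (t.length - p) (by omega)]
      congr 1; omega
    rw [hip]
    show next_int s ((p : Int) - t.length) = next_int_alt s ((p : Int) - t.length)
    simp only [next_int, next_int_alt, ← ht]
    rw [loopA_eq_neg t _ p [] hbound hfuel, hslice]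
    have hfind : nextIntFindB (t.drop p).length (t.drop p) 0
        = ((t.drop p).takeWhile pvScanPred).length := by
      have := findB_eq (t.drop p) 0
      simpa using this
    rw [hfind, take_takeWhile_length, filter_ne_space_eq]
    simp only [List.nil_append]
    have : (((p + ((t.drop p).takeWhile pvScanPred).length : Nat) : Int) - t.length)
        = ((p : Int) - t.length) + (((t.drop p).takeWhile pvScanPred).length : Int) := by push_cast; ring
    rw [this]
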